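-- pv_equiv track=rewrite | github.com/greendolphin7/Algorithm_Practice | 알고리즘/BOJ/BOJ2851.py | supermario
-- ===== SOURCE A (Python) =====
-- def supermario(scores):
--     result = []
--     total_score = 0
--     answer = 0
--
--     for i in scores:
--         total_score += i
--         result.append(total_score)
--
--         if total_score == 100:
--             return 100
--
--         if result[-1] > 100 and len(result) >= 2:
--             abs1 = abs(100 - result[-1])
--             abs2 = abs(100 - result[-2])
--
--             if abs1 == abs2:
--                 answer = result[-1]
--                 return answer
--             elif abs1 > abs2:
--                 answer = result[-2]
--                 return answer
--             else:
--                 answer = result[-1]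
--                 return answer
--         if result[-1] > 100 and len(result) == 1:
--             answer = result[-1]
--             return answer
--     answer = result[-1]
--     return answer
-- ===== SOURCE B (Python) =====
-- def supermario(scores):
--     # stage 1: prefix sums; stage 2: locate the first crossing index;
--     # stage 3: O(1) decision by min-with-key on at most two candidates
--     prefixes = []
--     t = 0
--     for x in scores:
--         t += x
--         prefixes.append(t)
--     k = next((i for i, p in enumerate(prefixes) if p >= 100), None)
--     if k is None:
--         return prefixes[-1]
--     if k == 0:
--         return prefixes[k]
--     return min(prefixes[k - 1], prefixes[k], key=lambda v: (abs(100 - v), v < 100))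
-- ===== Notes on version B (the rewrite author's own statement) =====
-- stated objective: alternative
-- what changed: B replaces A's fused loop with in-loop abs tie-breaking by three independent stages: build the prefix-sum list, locate the index of the first prefix >= 100 with a generator search, then decide in O(1) by min-with-key over (at most) the crossing prefix and its predecessor, with key (abs(100-v), v<100) encoding the tie rule.
-- outside the precondition, e.g. on supermario([]): A raises IndexError, B raises IndexError
import Mathlib
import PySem

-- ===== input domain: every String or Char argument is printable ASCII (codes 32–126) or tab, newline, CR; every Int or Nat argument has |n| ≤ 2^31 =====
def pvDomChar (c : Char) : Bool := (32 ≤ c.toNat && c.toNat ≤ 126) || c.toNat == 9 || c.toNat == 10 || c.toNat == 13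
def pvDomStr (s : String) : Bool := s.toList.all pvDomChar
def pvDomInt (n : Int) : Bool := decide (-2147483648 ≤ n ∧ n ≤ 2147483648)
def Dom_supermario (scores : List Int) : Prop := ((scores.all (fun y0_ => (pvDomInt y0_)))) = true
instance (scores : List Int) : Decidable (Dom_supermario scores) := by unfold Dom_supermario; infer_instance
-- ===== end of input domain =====

-- B decomposes the task into three stages (prefix-sum list, first-crossing index search,
-- O(1) min-with-key decision) replacing A's single fused loop with in-loop tie logic.

-- ===== PORT A =====
-- A's for-loop with early returns; result list and total_score carried as in the Python.
-- result[-1] / result[-2] are ported with PySem.List.pyGet?; the final result[-1] on an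
-- empty input is an IndexError in Python (excluded by Pre_), .getD 0 here.
def supermarioLoop (scores : List Int) (result : List Int) (total_score : Int) : Int :=
  match scores with
  | [] => ((PySem.List.pyGet? result (-1)).getD 0)
  | i :: rest =>
    let total_score := total_score + i
    let result := result ++ [total_score]
    if total_score = 100 then 100
    else if ((PySem.List.pyGet? result (-1)).getD 0 > 100) ∧ (result.length ≥ 2) then
      let abs1 := |100 - (PySem.List.pyGet? result (-1)).getD 0|
      let abs2 := |100 - (PySem.List.pyGet? result (-2)).getD 0|
      if abs1 = abs2 then (PySem.List.pyGet? result (-1)).getD 0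
      else if abs1 > abs2 then (PySem.List.pyGet? result (-2)).getD 0
      else (PySem.List.pyGet? result (-1)).getD 0
    else if ((PySem.List.pyGet? result (-1)).getD 0 > 100) ∧ (result.length = 1) then
      (PySem.List.pyGet? result (-1)).getD 0
    else supermarioLoop rest result total_score

def supermario (scores : List Int) : Int :=
  supermarioLoop scores [] 0

-- ===== PORT B =====
-- stage 1 of Source B: build the prefix-sum list
def prefixesOf (scores : List Int) (t : Int) : List Int :=
  match scores with
  | [] => []
  | x :: rest => (t + x) :: prefixesOf rest (t + x)

-- stage 2 of Source B: next((i for i, p in enumerate(prefixes) if p >= 100), None)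
def firstCross : List Int → Option Nat
  | [] => none
  | p :: rest => if p ≥ 100 then some 0 else (firstCross rest).map (· + 1)

-- stage 3 of Source B: the key lambda (abs(100-v), v<100) and Python's two-argument
-- min with key (first argument wins ties); tuple order on Int × Bool is hand-ported
-- (exact: lexicographic, False < True).
def keyOf (v : Int) : Int × Bool := (|100 - v|, decide (v < 100))
def keyLt (a b : Int × Bool) : Bool := a.1 < b.1 || (a.1 == b.1 && (!a.2 && b.2))
def min2 (a b : Int) : Int := if keyLt (keyOf b) (keyOf a) then b else a

def supermario_alt (scores : List Int) : Int :=
  let prefixes := prefixesOf scores 0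
  match firstCross prefixes with
  | none => (PySem.List.pyGet? prefixes (-1)).getD 0
  | some k =>
    if k = 0 then (PySem.List.pyGet? prefixes (k : Int)).getD 0
    else min2 ((PySem.List.pyGet? prefixes ((k : Int) - 1)).getD 0)
              ((PySem.List.pyGet? prefixes (k : Int)).getD 0)

-- ===== PRECONDITION & SPEC =====
-- Pre_ excludes only the empty list, on which Python A raises IndexError (result[-1] of []).
def Pre_supermario (scores : List Int) : Prop := scores ≠ []
instance (scores : List Int) : Decidable (Pre_supermario scores) := by unfold Pre_supermario; infer_instance
def pvWitness_supermario : List Int := [20, 50, 60]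

def Spec_supermario (scores : List Int) (out : Int) : Prop := out = supermario_alt scores
instance (scores : List Int) (out : Int) : Decidable (Spec_supermario scores out) := by unfold Spec_supermario; infer_instance

-- ===== CLAIM (what is proved, stated in full; the proofs are below) =====
def Claim_equal_supermario : Prop := ∀ (scores : List Int), Dom_supermario scores → Pre_supermario scores → Spec_supermario scores (supermario scores)

-- ===== LEMMAS AND PROOFS =====

-- B's selection, as a function of the full prefix list (what supermario_alt computes)
def stage23 (prefixes : List Int) : Int :=
  match firstCross prefixes with
  | none => (PySem.List.pyGet? prefixes (-1)).getD 0
  | some k =>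
    if k = 0 then (PySem.List.pyGet? prefixes (k : Int)).getD 0
    else min2 ((PySem.List.pyGet? prefixes ((k : Int) - 1)).getD 0)
              ((PySem.List.pyGet? prefixes (k : Int)).getD 0)

theorem alt_eq_stage23 (scores : List Int) : supermario_alt scores = stage23 (prefixesOf scores 0) := rfl

theorem stage23_none (l : List Int) (h : firstCross l = none) :
    stage23 l = (PySem.List.pyGet? l (-1)).getD 0 := by
  rw [stage23, h]

theorem stage23_some (l : List Int) (k : Nat) (h : firstCross l = some k) :
    stage23 l = if k = 0 then (PySem.List.pyGet? l (k : Int)).getD 0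
      else min2 ((PySem.List.pyGet? l ((k : Int) - 1)).getD 0)
                ((PySem.List.pyGet? l (k : Int)).getD 0) := by
  rw [stage23, h]

theorem firstCross_none (l : List Int) (h : ∀ x ∈ l, x < 100) : firstCross l = none := by
  induction l with
  | nil => rfl
  | cons a l ih =>
    simp only [firstCross]
    rw [if_neg (by have := h a (by simp); omega), ih (fun x hx => h x (by simp [hx]))]
    rfl

theorem firstCross_append (res : List Int) (p : Int) (tl : List Int)
    (hres : ∀ x ∈ res, x < 100) (hp : p ≥ 100) :
    firstCross (res ++ p :: tl) = some res.length := by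
  induction res with
  | nil => simp [firstCross, hp]
  | cons a l ih =>
    simp only [List.cons_append, firstCross]
    rw [if_neg (by have := hres a (by simp); omega),
        ih (fun x hx => hres x (by simp [hx]))]
    simp

-- invariant: A's loop over `scores`, with accumulated prefix list `res` all of whose
-- elements are < 100, equals B's stages 2–3 run on the full prefix list.
theorem loop_eq (scores : List Int) : ∀ (res : List Int) (total : Int),
    (∀ x ∈ res, x < 100) →
    supermarioLoop scores res total = stage23 (res ++ prefixesOf scores total) := by
  induction scores with
  | nil =>
    intro res total hres
    rw [prefixesOf, List.append_nil, stage23_none res (firstCross_none res hres)]; simp [supermarioLoop]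
  | cons i rest ih =>
    intro res total hres
    rw [supermarioLoop, prefixesOf]
    set p := total + i with hp
    by_cases hge : p ≥ 100
    · -- crossing now: firstCross finds index res.length
      have hfc := firstCross_append res p (prefixesOf rest p) hres hge
      have hget : PySem.List.pyGet? (res ++ p :: prefixesOf rest p) ((res.length : Nat) : Int)
          = some p := by
        rw [PySem.List.pyGet?_natCast]
        simp
      by_cases h100 : p = 100
      · -- A returns 100; B: prefixes[k] = 100, and min2 prev 100 = 100
        rw [if_pos h100]
        rw [stage23_some _ _ hfc]
        cases res with
        | nil => simp at hget ⊢; simp [h100]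
        | cons r rs =>
          have hk0 : (r :: rs).length ≠ 0 := by simp
          rw [if_neg hk0]
          have hprev : PySem.List.pyGet? ((r :: rs) ++ p :: prefixesOf rest p)
              (((r :: rs).length : Int) - 1) = (r :: rs).getLast? := by
            have : ((r :: rs).length : Int) - 1 = (((r :: rs).length - 1 : Nat) : Int) := by
              omega
            rw [this, PySem.List.pyGet?_natCast, List.getElem?_append_left (by simp),
                List.getLast?_eq_getElem?]
          obtain ⟨q, hq⟩ : ∃ q, (r :: rs).getLast? = some q := by
            cases hh : (r :: rs).getLast? with
            | none => simp [List.getLast?_eq_none_iff] at hh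
            | some q => exact ⟨q, rfl⟩
          have hqlt : q < 100 := hres q (List.mem_of_getLast? hq)
          rw [hget, hprev, hq]
          simp only [Option.getD_some, h100]
          have : keyLt (keyOf 100) (keyOf q) = true := by
            simp [keyLt, keyOf, abs_of_nonneg (by omega : (0:Int) ≤ 100 - q)]
            omega
          simp [min2, this]
      · -- p > 100
        have hgt : p > 100 := by omega
        rw [if_neg h100]
        have hlast : PySem.List.pyGet? (res ++ [p]) (-1) = some p :=
          PySem.List.pyGet?_neg_one_append_singleton res p
        rw [stage23_some _ _ hfc]
        cases res with
        | nil =>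
          simp only [List.nil_append, List.length_nil] at hget ⊢
          simp [PySem.List.pyGet?_neg_one, hgt]
        | cons r rs =>
          have hk0 : (r :: rs).length ≠ 0 := by simp
          rw [if_neg hk0]
          have hprevA : PySem.List.pyGet? ((r :: rs) ++ [p]) (-2) = (r :: rs).getLast? := by
            rw [PySem.List.pyGet?_neg_ofNat _ 2 (by omega) (by simp)]
            rw [List.getElem?_append_left (by simp), List.getLast?_eq_getElem?]
            congr 1
            simp
          have hprevB : PySem.List.pyGet? ((r :: rs) ++ p :: prefixesOf rest p)
              (((r :: rs).length : Int) - 1) = (r :: rs).getLast? := by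
            have : ((r :: rs).length : Int) - 1 = (((r :: rs).length - 1 : Nat) : Int) := by
              omega
            rw [this, PySem.List.pyGet?_natCast, List.getElem?_append_left (by simp),
                List.getLast?_eq_getElem?]
          obtain ⟨q, hq⟩ : ∃ q, (r :: rs).getLast? = some q := by
            cases hh : (r :: rs).getLast? with
            | none => simp [List.getLast?_eq_none_iff] at hh
            | some q => exact ⟨q, rfl⟩
          have hqlt : q < 100 := hres q (List.mem_of_getLast? hq)
          rw [if_pos ⟨by rw [hlast]; simpa using hgt,
                      by simp only [List.length_append, List.length_cons]; omega⟩]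
          rw [hlast, hprevA, hq, hget, hprevB, hq]
          simp only [Option.getD_some]
          have habs1 : |100 - p| = p - 100 := by rw [abs_of_nonpos (by omega)]; ring
          have habs2 : |100 - q| = 100 - q := abs_of_nonneg (by omega)
          simp only [min2, keyLt, keyOf, habs1, habs2]
          split_ifs <;> simp_all <;> omega
    · -- no crossing: both recurse / B's search skips p
      have hlt : p < 100 := by omega
      have h100 : ¬ p = 100 := by omega
      have hlast : PySem.List.pyGet? (res ++ [p]) (-1) = some p :=
        PySem.List.pyGet?_neg_one_append_singleton res p
      rw [if_neg h100, if_neg (by simp [hlast]; omega), if_neg (by simp [hlast]; omega)]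
      have := ih (res ++ [p]) p (by intro x hx; simp at hx; rcases hx with h | h; exact hres x h; omega)
      rw [this]
      simp

-- ===== VERDICT (by name: the statement is the Claim_ definition above) =====
theorem supermario_spec : Claim_equal_supermario := by
  intro scores _ _
  unfold Spec_supermario supermario
  rw [alt_eq_stage23]
  simpa using loop_eq scores [] 0 (by simp)
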